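-- pv_equiv track=rewrite | github.com/farazlfc/CP | Sum_of_bit_diff_among_all_pairs.py | func
-- ===== SOURCE A (Python) =====
-- def func(arr,n):
--
--     ans = 0  # Initialize result
--
--     # traverse over all poss. bit positions
--     for i in range(0, 32):
--
--         # count number of elements with the i'th bit set
--         count = 0
--         for j in range(0,n):
--             if ( (arr[j] & (1 << i)) ):  #left shift bit to check if that bit is set(<< operator is used to left shift)
--                 count+=1
--
--         # Add "count * (n - count) * 2" to the answer, 2 for (i,j) and (j,i).
--         ans += (count * (n - count) * 2);
--
--     return ans
-- ===== SOURCE B (Python) =====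
-- def func(arr, n):
--     ans = 0
--     for i in range(n):
--         for j in range(n):
--             v = (arr[i] ^ arr[j]) & 0xFFFFFFFF
--             for k in range(32):
--                 ans += (v >> k) & 1
--     return ans
-- ===== Notes on version B (the rewrite author's own statement) =====
-- stated objective: alternative
-- what changed: Replaced the per-bit-position counting (for each of 32 bit positions count set bits and use count*(n-count)*2) by the direct pairwise sum: for every ordered pair of elements, add the popcount of the 32-bit-masked XOR.
import Mathlib
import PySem

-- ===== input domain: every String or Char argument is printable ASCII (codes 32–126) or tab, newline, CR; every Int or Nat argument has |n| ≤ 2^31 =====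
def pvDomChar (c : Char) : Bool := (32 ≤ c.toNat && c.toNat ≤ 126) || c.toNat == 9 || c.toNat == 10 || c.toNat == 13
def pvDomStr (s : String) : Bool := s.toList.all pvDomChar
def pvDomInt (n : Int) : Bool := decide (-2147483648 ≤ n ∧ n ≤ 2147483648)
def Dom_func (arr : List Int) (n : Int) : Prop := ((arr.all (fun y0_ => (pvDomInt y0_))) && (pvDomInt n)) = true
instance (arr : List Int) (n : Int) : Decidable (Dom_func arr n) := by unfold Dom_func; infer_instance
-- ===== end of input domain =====

-- B replaces A's per-bit-position counting (count*(n-count)*2 for each of the 32 bit positions)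
-- by the direct pairwise sum of popcounts of the 32-bit-masked XORs: an alternative algorithm, not faster.

-- ===== PORT A =====
-- literal port of Source A: for i in range(32): count elements of arr[0:n] with bit i set; ans += count*(n-count)*2
def func (arr : List Int) (n : Int) : Int :=
  (PySem.List.pyRange 0 32 1).foldl (fun ans i =>
    let count : Int :=
      (PySem.List.pyRange 0 n 1).foldl
        (fun count j =>
          if PySem.Int.band (PySem.List.pyGetD arr j 0) ((1 : Int) <<< i.toNat) ≠ 0 then count + 1
          else count) 0
    ans + count * (n - count) * 2) 0

-- ===== PORT B =====
-- literal port of Source B: for every ordered pair (i,j) in range(n)^2, add the bits of ((arr[i]^arr[j]) & 0xFFFFFFFF)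
def func_alt (arr : List Int) (n : Int) : Int :=
  (PySem.List.pyRange 0 n 1).foldl (fun ans i =>
    (PySem.List.pyRange 0 n 1).foldl (fun ans j =>
      let v : Int :=
        PySem.Int.band
          (PySem.Int.bxor (PySem.List.pyGetD arr i 0) (PySem.List.pyGetD arr j 0)) 4294967295
      (PySem.List.pyRange 0 32 1).foldl
        (fun ans k => ans + PySem.Int.band (v >>> k.toNat) 1) ans) ans) 0

-- ===== PRECONDITION & SPEC =====
-- A raises IndexError (arr[j]) when n exceeds len(arr); B raises on exactly the same inputs, so they are excluded.
def Pre_func (arr : List Int) (n : Int) : Prop := n ≤ PySem.List.len arr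
instance (arr : List Int) (n : Int) : Decidable (Pre_func arr n) := by unfold Pre_func; infer_instance
def pvWitness_func : List Int × Int := ([3, 5, -2], 3)

def Spec_func (arr : List Int) (n : Int) (out : Int) : Prop := out = func_alt arr n
instance (arr : List Int) (n : Int) (out : Int) : Decidable (Spec_func arr n out) := by unfold Spec_func; infer_instance

-- ===== CLAIM (what is proved, stated in full; the proofs are below) =====
def Claim_equal_func : Prop := ∀ (arr : List Int) (n : Int), Dom_func arr n → Pre_func arr n → Spec_func arr n (func arr n)

-- ===== LEMMAS AND PROOFS =====

-- (w >> k) & 1 reads bit k of a natural number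
theorem natTerm (w k : Nat) : (w >>> k) &&& 1 = (w.testBit k).toNat := by
  simp [Nat.testBit, Nat.and_one_is_mod]
  rcases Nat.mod_two_eq_zero_or_one (w >>> k) with h | h <;> simp [h]

-- subtracting from an all-ones mask complements the low bits
theorem complement (n r : Nat) (h : r < 2 ^ n) : (2 ^ n - 1) - r = r ^^^ (2 ^ n - 1) := by
  induction n generalizing r with
  | zero => interval_cases r; decide
  | succ n ih =>
    have hpow : 2 ^ (n + 1) = 2 * 2 ^ n := by ring
    have hp : 0 < 2 ^ n := Nat.two_pow_pos n
    have hdiv : (2 ^ (n + 1) - 1) / 2 = 2 ^ n - 1 := by omega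
    have hrd : r / 2 < 2 ^ n := by omega
    have he2 : (r ^^^ (2 ^ (n + 1) - 1)) % 2 = (r + (2 ^ (n + 1) - 1)) % 2 :=
      Nat.xor_mod_two_eq
    have hed : (r ^^^ (2 ^ (n + 1) - 1)) / 2 = (2 ^ n - 1) - r / 2 := by
      rw [Nat.xor_div_two, hdiv, ← ih _ hrd]
    have := Nat.div_add_mod (r ^^^ (2 ^ (n + 1) - 1)) 2
    have := Nat.div_add_mod r 2
    omega

-- PySem's Python-exact xor coincides with Mathlib's Int.xor
theorem bxor_eq_xor (a b : Int) : PySem.Int.bxor a b = Int.xor a b := by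
  rcases a with m | m <;> rcases b with n | n <;>
    simp [PySem.Int.bxor, Int.xor, Int.negSucc_eq] <;> omega

-- the truthiness test `x & (1 << k)` of A reads bit k of the (possibly negative) integer
theorem band_two_pow_ne (a : Int) (k : Nat) :
    (PySem.Int.band a ((1 : Int) <<< k) ≠ 0) ↔ a.testBit k = true := by
  have hs : ((1 : Int) <<< k) = ((2 ^ k : Nat) : Int) := by
    rw [Int.shiftLeft_eq]; push_cast; ring
  have hp : 2 ^ k ≠ 0 := by have := Nat.two_pow_pos k; omega
  rcases a with m | m
  · rw [hs]
    simp only [PySem.Int.band, Int.ofNat_eq_natCast, Int.natCast_nonneg, if_true,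
      Int.toNat_natCast, Int.testBit]
    rw [Nat.and_two_pow]
    cases h : m.testBit k <;> simp [h, hp]
  · rw [hs]
    have h1 : ¬ (0 : Int) ≤ Int.negSucc m := by
      simp only [not_le]; exact Int.negSucc_lt_zero m
    have h2 : (-(Int.negSucc m) - 1).toNat = m := by
      simp only [Int.negSucc_eq]; omega
    simp only [PySem.Int.band, h1, h2, Int.toNat_natCast, Int.testBit]
    rw [Nat.two_pow_and]
    cases h : m.testBit k <;> simp [h]

theorem band_natCast_one (w : Nat) : PySem.Int.band (w : Int) 1 = ((w &&& 1 : Nat) : Int) := by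
  simp only [PySem.Int.band, Int.natCast_nonneg, if_true]
  norm_num

-- masking with 0xFFFFFFFF and reading bit k (< 32) reads bit k of the original integer
theorem bandTerm (z : Int) (k : Nat) (hk : k < 32) :
    PySem.Int.band ((PySem.Int.band z 4294967295) >>> k) 1 = ((z.testBit k).toNat : Int) := by
  have hm : (4294967295 : Nat) = 2 ^ 32 - 1 := by norm_num
  have hTN : (4294967295 : Int).toNat = 4294967295 := rfl
  have hnn : (0 : Int) ≤ 4294967295 := by norm_num
  rcases z with m | m
  · have h1 : PySem.Int.band (Int.ofNat m) 4294967295 = ((m % 2 ^ 32 : Nat) : Int) := by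
      simp only [PySem.Int.band, Int.ofNat_eq_natCast, Int.natCast_nonneg, if_true, hnn,
        Int.toNat_natCast, hTN]
      rw [hm, Nat.and_two_pow_sub_one_eq_mod]
    rw [h1]
    have h2 : ((m % 2 ^ 32 : Nat) : Int) >>> k = (((m % 2 ^ 32) >>> k : Nat) : Int) := rfl
    rw [h2, band_natCast_one, natTerm, Nat.testBit_mod_two_pow]
    simp [hk, Int.testBit]
  · have h0 : ¬ (0 : Int) ≤ Int.negSucc m := by
      simp only [not_le]; exact Int.negSucc_lt_zero m
    have h2 : (-(Int.negSucc m) - 1).toNat = m := by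
      simp only [Int.negSucc_eq]; omega
    have hr : m % 2 ^ 32 < 2 ^ 32 := Nat.mod_lt _ (Nat.two_pow_pos 32)
    have h1 : PySem.Int.band (Int.negSucc m) 4294967295
        = (((m % 2 ^ 32) ^^^ (2 ^ 32 - 1) : Nat) : Int) := by
      simp only [PySem.Int.band, h0, if_false, hnn, if_true, h2, hTN]
      rw [hm, Nat.land_comm, Nat.and_two_pow_sub_one_eq_mod, ← complement 32 _ hr]
    rw [h1]
    have h3 : (((m % 2 ^ 32) ^^^ (2 ^ 32 - 1) : Nat) : Int) >>> k
        = ((((m % 2 ^ 32) ^^^ (2 ^ 32 - 1)) >>> k : Nat) : Int) := rfl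
    rw [h3, band_natCast_one, natTerm, Nat.testBit_xor, Nat.testBit_mod_two_pow,
      Nat.testBit_two_pow_sub_one]
    simp [hk, Int.testBit]

-- B's innermost term is the bit-difference indicator
theorem term_eq (x y : Int) (k : Nat) (hk : k < 32) :
    PySem.Int.band ((PySem.Int.band (PySem.Int.bxor x y) 4294967295) >>> k) 1
      = if x.testBit k ≠ y.testBit k then (1 : Int) else 0 := by
  rw [bxor_eq_xor, bandTerm _ k hk, Int.testBit_lxor]
  cases x.testBit k <;> cases y.testBit k <;> simp

theorem ite_ne_sum (t : List Bool) (b : Bool) :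
    (t.map (fun c => if b ≠ c then (1 : Int) else 0)).sum = (t.count (!b) : Int) := by
  have h1 : (t.map (fun c => if b ≠ c then (1 : Int) else 0))
      = (t.map (fun c => if ((fun c => c == !b) c) = true then (1 : Int) else 0)) := by
    apply List.map_congr_left; intro a _; cases a <;> cases b <;> simp
  rw [h1, PySem.List.sum_map_ite_one_zero]
  rfl

theorem ite_ne_sum' (t : List Bool) (b : Bool) :
    (t.map (fun x => if x ≠ b then (1 : Int) else 0)).sum = (t.count (!b) : Int) := by
  rw [← ite_ne_sum t b]
  apply congrArg; apply List.map_congr_left; intro a _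
  simp [ne_comm]

theorem count_not (t : List Bool) : t.count false + t.count true = t.length := by
  induction t with
  | nil => simp
  | cons a t ih => cases a <;> simp <;> omega

-- the pairwise sum of difference indicators is 2 * count * (length - count)
theorem boolPairSum (bs : List Bool) :
    (bs.map (fun b => (bs.map (fun c => if b ≠ c then (1 : Int) else 0)).sum)).sum
      = 2 * (bs.count true : Int) * ((bs.length : Int) - (bs.count true : Int)) := by
  induction bs with
  | nil => simp
  | cons b t ih =>
    simp only [List.map_cons, List.sum_cons]
    rw [PySem.List.sum_map_add_int t (fun x => if x ≠ b then (1 : Int) else 0)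
      (fun x => (t.map (fun c => if x ≠ c then (1 : Int) else 0)).sum)]
    rw [ite_ne_sum, ite_ne_sum', ih]
    have hcf : (t.count false : Int) = (t.length : Int) - (t.count true : Int) := by
      have := count_not t; omega
    cases b <;>
      simp only [List.count_cons, List.length_cons, Bool.not_true, Bool.not_false, ne_eq,
        not_true_eq_false, if_false, beq_self_eq_true, if_true, beq_iff_eq] <;>
      push_cast <;>
      [ring; linear_combination 2 * hcf]

-- finite double sums commute
theorem sumswap {α β : Type} (l : List α) (r : List β) (f : α → β → Int) :
    (l.map (fun x => (r.map (fun k => f x k)).sum)).sum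
      = (r.map (fun k => (l.map (fun x => f x k)).sum)).sum := by
  induction l with
  | nil => simp
  | cons a t ih =>
    simp only [List.map_cons, List.sum_cons]
    rw [ih, ← PySem.List.sum_map_add_int r (fun k => f a k)
      (fun k => (t.map (fun x => f x k)).sum)]

-- the indices 0..n-1 fetch exactly the prefix arr[0:n]
theorem map_getD_take (arr : List Int) (n : Int) (h : n ≤ PySem.List.len arr) :
    (PySem.List.pyRange 0 n 1).map (fun j => PySem.List.pyGetD arr j 0) = arr.take n.toNat := by
  have hn : n.toNat ≤ arr.length := by simp [PySem.List.len_eq] at h; omega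
  rw [PySem.List.pyRange_one, List.map_map]
  apply List.ext_getElem
  · simp [hn]
  · intro i h1 h2
    simp only [List.getElem_map, List.getElem_range, Function.comp, zero_add,
      PySem.List.pyGetD_natCast, List.getElem_take]
    have hi : i < arr.length := by simp at h1; omega
    exact List.getD_eq_getElem arr 0 hi

theorem funcA_eq (arr : List Int) (n : Int) (h : n ≤ PySem.List.len arr) :
    func arr n = ((List.range 32).map (fun k =>
      ((arr.take n.toNat).countP (fun a => a.testBit k) : Int)
        * (n - ((arr.take n.toNat).countP (fun a => a.testBit k) : Int)) * 2)).sum := by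
  unfold func
  simp only [PySem.List.foldl_add, zero_add]
  rw [PySem.List.pyRange_one 0 32, List.map_map]
  have h32 : ((32 : Int) - 0).toNat = 32 := rfl
  rw [h32]
  apply congrArg
  apply List.map_congr_left
  intro k hk
  simp only [Function.comp, zero_add, Int.toNat_natCast, Int.shiftLeft_natCast_right]
  have hfun : (fun (count : Int) (j : Int) =>
      if PySem.Int.band (PySem.List.pyGetD arr j 0) ((1 : Int) <<< k) ≠ 0 then count + 1
      else count)
      = (fun (count : Int) (j : Int) =>
      if (fun j => (PySem.List.pyGetD arr j 0).testBit k) j = true then count + 1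
      else count) := by
    funext c j
    by_cases hb : (PySem.List.pyGetD arr j 0).testBit k = true
    · rw [if_pos ((band_two_pow_ne _ k).mpr hb), if_pos hb]
    · rw [if_neg (fun hc => hb ((band_two_pow_ne _ k).mp hc)), if_neg hb]
  rw [hfun, PySem.List.foldl_count_if, zero_add, ← map_getD_take arr n h, List.countP_map]
  rfl

set_option maxHeartbeats 1000000 in
theorem funcB_eq (arr : List Int) (n : Int) (h : n ≤ PySem.List.len arr) :
    func_alt arr n = ((List.range 32).map (fun k =>
      ((arr.take n.toNat).map (fun x =>
        ((arr.take n.toNat).map (fun y =>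
          if x.testBit k ≠ y.testBit k then (1 : Int) else 0)).sum)).sum)).sum := by
  unfold func_alt
  simp only [PySem.List.foldl_add, zero_add]
  have hIJ : ∀ (F : Int → Int), ((PySem.List.pyRange 0 n 1).map
      (fun i => F (PySem.List.pyGetD arr i 0))).sum = ((arr.take n.toNat).map F).sum := by
    intro F
    rw [← map_getD_take arr n h, List.map_map]
    rfl
  have hK : ∀ x y : Int, ((PySem.List.pyRange 0 32 1).map (fun k =>
      PySem.Int.band ((PySem.Int.band (PySem.Int.bxor x y) 4294967295) >>> k.toNat) 1)).sum
      = ((List.range 32).map (fun k =>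
        if x.testBit k ≠ y.testBit k then (1 : Int) else 0)).sum := by
    intro x y
    rw [PySem.List.pyRange_one 0 32, List.map_map]
    have h32 : ((32 : Int) - 0).toNat = 32 := rfl
    rw [h32]
    apply congrArg
    apply List.map_congr_left
    intro k hk
    simp only [Function.comp, zero_add, Int.toNat_natCast, Int.shiftRight_natCast_right]
    exact term_eq x y k (List.mem_range.mp hk)
  set l := arr.take n.toNat with hl
  calc ((PySem.List.pyRange 0 n 1).map (fun i =>
          ((PySem.List.pyRange 0 n 1).map (fun j =>
            ((PySem.List.pyRange 0 32 1).map (fun k =>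
              PySem.Int.band ((PySem.Int.band (PySem.Int.bxor (PySem.List.pyGetD arr i 0)
                (PySem.List.pyGetD arr j 0)) 4294967295) >>> k.toNat) 1)).sum)).sum)).sum
      = (l.map (fun x => ((PySem.List.pyRange 0 n 1).map (fun j =>
            ((PySem.List.pyRange 0 32 1).map (fun k =>
              PySem.Int.band ((PySem.Int.band (PySem.Int.bxor x
                (PySem.List.pyGetD arr j 0)) 4294967295) >>> k.toNat) 1)).sum)).sum)).sum :=
        hIJ (fun x => ((PySem.List.pyRange 0 n 1).map (fun j =>
            ((PySem.List.pyRange 0 32 1).map (fun k =>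
              PySem.Int.band ((PySem.Int.band (PySem.Int.bxor x
                (PySem.List.pyGetD arr j 0)) 4294967295) >>> k.toNat) 1)).sum)).sum)
    _ = (l.map (fun x => (l.map (fun y =>
            ((PySem.List.pyRange 0 32 1).map (fun k =>
              PySem.Int.band ((PySem.Int.band (PySem.Int.bxor x y) 4294967295)
                >>> k.toNat) 1)).sum)).sum)).sum := by
        apply congrArg; apply List.map_congr_left; intro x _
        exact hIJ (fun y => ((PySem.List.pyRange 0 32 1).map (fun k =>
              PySem.Int.band ((PySem.Int.band (PySem.Int.bxor x y) 4294967295)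
                >>> k.toNat) 1)).sum)
    _ = (l.map (fun x => (l.map (fun y => ((List.range 32).map (fun k =>
            if x.testBit k ≠ y.testBit k then (1 : Int) else 0)).sum)).sum)).sum := by
        apply congrArg; apply List.map_congr_left; intro x _
        apply congrArg; apply List.map_congr_left; intro y _
        exact hK x y
    _ = (l.map (fun x => ((List.range 32).map (fun k => (l.map (fun y =>
            if x.testBit k ≠ y.testBit k then (1 : Int) else 0)).sum)).sum)).sum := by
        apply congrArg; apply List.map_congr_left; intro x _
        exact sumswap l (List.range 32) (fun y k =>
          if x.testBit k ≠ y.testBit k then (1 : Int) else 0)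
    _ = ((List.range 32).map (fun k => (l.map (fun x => (l.map (fun y =>
            if x.testBit k ≠ y.testBit k then (1 : Int) else 0)).sum)).sum)).sum :=
        sumswap l (List.range 32) (fun x k => (l.map (fun y =>
          if x.testBit k ≠ y.testBit k then (1 : Int) else 0)).sum)

-- ===== VERDICT (by name: the statement is the Claim_ definition above) =====
theorem func_spec : Claim_equal_func := by
  intro arr n _ hpre
  unfold Spec_func
  unfold Pre_func at hpre
  rw [funcA_eq arr n hpre, funcB_eq arr n hpre]
  apply congrArg
  apply List.map_congr_left
  intro k _
  set l := arr.take n.toNat with hl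
  set p : Int → Bool := fun a => a.testBit k with hp
  have hbps := boolPairSum (l.map p)
  simp only [List.map_map, List.length_map] at hbps
  have hcnt : (l.map p).count true = l.countP p := by
    simp only [List.count, List.countP_map]
    apply List.countP_congr; intro a _
    simp [Function.comp]
  rw [hcnt] at hbps
  have hstep : (l.map (fun x => (l.map (fun y =>
      if x.testBit k ≠ y.testBit k then (1 : Int) else 0)).sum)).sum
      = 2 * (l.countP p : Int) * ((l.length : Int) - (l.countP p : Int)) := by
    rw [← hbps]
    rfl
  rw [hstep]
  by_cases hn : 0 ≤ n
  · have hlen : (l.length : Int) = n := by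
      have hn2 : n.toNat ≤ arr.length := by simp [PySem.List.len_eq] at hpre; omega
      simp [hl, List.length_take, Nat.min_eq_left hn2, Int.toNat_of_nonneg hn]
    rw [hlen]; ring
  · have hl0 : l = [] := by
      have : n.toNat = 0 := by omega
      simp [hl, this]
    simp [hl0]
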